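-- pv_equiv track=rewrite | github.com/Alexamakans/advent-of-code-python | aoc/years/y2025/day03/solver.py | get_highest
-- ===== SOURCE A (Python) =====
-- from typing import NamedTuple
--
-- class ValueAndIndex(NamedTuple):
--     value: int
--     i: int
--
-- def get_highest(s: str, max_allowed_index: int, after_index: int) -> ValueAndIndex:
--     high_value = -1
--     high_index = 0
--     for i, c in enumerate(s[after_index + 1 : max_allowed_index + 1]):
--         if int(c) > high_value:
--             high_value = int(c)
--             high_index = i
--     return ValueAndIndex(high_value, after_index + 1 + high_index)
-- ===== SOURCE B (Python) =====
-- from typing import NamedTuple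
--
-- class ValueAndIndex(NamedTuple):
--     value: int
--     i: int
--
-- def get_highest(s: str, max_allowed_index: int, after_index: int) -> ValueAndIndex:
--     sub = s[after_index + 1 : max_allowed_index + 1]
--     for d in "9876543210":
--         try:
--             pos = sub.index(d)
--         except ValueError:
--             continue
--         return ValueAndIndex(int(d), after_index + 1 + pos)
--     return ValueAndIndex(-1, after_index + 1)
-- ===== Notes on version B (the rewrite author's own statement) =====
-- stated objective: alternative
-- what changed: Instead of scanning the slice with a running max/index accumulator, B iterates over the digit alphabet '9' down to '0' and returns the first digit present in the slice together with its first position (sub.index), so the traversal is over the 10 possible values, not over the string state.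
import Mathlib
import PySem

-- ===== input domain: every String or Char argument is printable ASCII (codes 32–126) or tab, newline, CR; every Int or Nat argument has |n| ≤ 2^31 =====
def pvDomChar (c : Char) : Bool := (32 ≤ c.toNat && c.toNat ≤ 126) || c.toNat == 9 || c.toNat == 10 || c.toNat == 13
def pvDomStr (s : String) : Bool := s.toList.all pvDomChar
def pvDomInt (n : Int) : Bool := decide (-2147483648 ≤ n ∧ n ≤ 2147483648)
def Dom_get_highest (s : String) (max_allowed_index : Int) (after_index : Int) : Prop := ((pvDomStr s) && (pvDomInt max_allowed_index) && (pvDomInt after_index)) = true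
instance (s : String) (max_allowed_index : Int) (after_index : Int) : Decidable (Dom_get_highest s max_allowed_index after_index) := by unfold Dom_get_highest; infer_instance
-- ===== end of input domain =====

-- B replaces A's running-max/index scan of the slice by a scan of the digit ALPHABET '9'..'0',
-- returning the first digit present in the slice with its first position: the loop runs over
-- the 10 possible values instead of over the string. Same result on all-digit slices.
-- The NamedTuple ValueAndIndex is ported as the pair Int × Int.

-- ===== PORT A =====
-- the loop body of A: if int(c) > high_value: high_value, high_index = int(c), i
def stepA (st : Int × Int) (p : Int × Char) : Int × Int :=
  let v : Int := (PySem.Int.ofChars? [p.2]).getD 0   -- int(c); Pre_ excludes the ValueError (none) case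
  if v > st.1 then (v, p.1) else st

def get_highest (s : String) (max_allowed_index : Int) (after_index : Int) : Int × Int :=
  let st := (PySem.List.enumerate
      (PySem.List.slice s.toList (some (after_index + 1)) (some (max_allowed_index + 1))) 0).foldl
      stepA (-1, 0)
  (st.1, after_index + 1 + st.2)

-- ===== PORT B =====
-- B's loop over the digit alphabet: try sub.index(d) (ValueError = none → continue), else return.
def goB (sub : List Char) (after_index : Int) : List Char → Int × Int
  | [] => (-1, after_index + 1)
  | d :: ds =>
    match PySem.List.index? sub d with
    | some pos => ((PySem.Int.ofChars? [d]).getD 0, after_index + 1 + (pos : Int))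
    | none => goB sub after_index ds

def get_highest_alt (s : String) (max_allowed_index : Int) (after_index : Int) : Int × Int :=
  goB (PySem.List.slice s.toList (some (after_index + 1)) (some (max_allowed_index + 1)))
    after_index ['9','8','7','6','5','4','3','2','1','0']

-- ===== PRECONDITION & SPEC =====
-- Pre_ excludes exactly the inputs on which A raises ValueError: a non-digit character in the slice.
def Pre_get_highest (s : String) (max_allowed_index : Int) (after_index : Int) : Prop :=
  (PySem.List.slice s.toList (some (after_index + 1)) (some (max_allowed_index + 1))).all
    PySem.Chars.isdigit = true
instance (s : String) (max_allowed_index : Int) (after_index : Int) : Decidable (Pre_get_highest s max_allowed_index after_index) := by unfold Pre_get_highest; infer_instance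

def pvWitness_get_highest : String × Int × Int := ("123", 2, -1)

def Spec_get_highest (s : String) (max_allowed_index : Int) (after_index : Int) (out : Int × Int) : Prop := out = get_highest_alt s max_allowed_index after_index
instance (s : String) (max_allowed_index : Int) (after_index : Int) (out : Int × Int) : Decidable (Spec_get_highest s max_allowed_index after_index out) := by unfold Spec_get_highest; infer_instance

-- ===== CLAIM (what is proved, stated in full; the proofs are below) =====
def Claim_equal_get_highest : Prop := ∀ (s : String) (max_allowed_index : Int) (after_index : Int), Dom_get_highest s max_allowed_index after_index → Pre_get_highest s max_allowed_index after_index → Spec_get_highest s max_allowed_index after_index (get_highest s max_allowed_index after_index)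

-- ===== LEMMAS AND PROOFS =====
theorem digit_mem (c : Char) (h : PySem.Chars.isdigit c = true) :
    c ∈ ['0','1','2','3','4','5','6','7','8','9'] := by
  simp [PySem.Chars.isdigit, Char.le_def, UInt32.le_iff_toNat_le] at h
  have hv : c.val.toNat = c.toNat := rfl
  have h48 : 48 ≤ c.toNat := by simpa [hv] using h.1
  have h57 : c.toNat ≤ 57 := by simpa [hv] using h.2
  have : c = Char.ofNat c.toNat := (Char.ofNat_toNat c).symm
  interval_cases hn : c.toNat <;> simp_all

theorem digit_val (c : Char) (h : PySem.Chars.isdigit c = true) :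
    PySem.Int.ofChars? [c] = some ((c.toNat : Int) - 48) := by
  have hm := digit_mem c h
  fin_cases hm <;> decide

theorem digit_ge (c : Char) (h : PySem.Chars.isdigit c = true) : 48 ≤ c.toNat := by
  have hm := digit_mem c h
  fin_cases hm <;> decide

theorem lt_iff_toNat (a b : Char) : a < b ↔ a.toNat < b.toNat := by
  simp [Char.lt_def, UInt32.lt_iff_toNat_lt]

theorem notmem_index (sub : List Char) (M d : Char)
    (hub : ∀ x ∈ sub, x ≤ M) (hd : ¬ d ≤ M) : PySem.List.index? sub d = none :=
  (PySem.List.index?_eq_none_iff sub d).mpr (fun h => hd (hub d h))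

-- B's alphabet scan hits the maximum digit M of sub first (descending strictly sorted alphabet).
theorem goB_spec (sub : List Char) (ai : Int) (M : Char)
    (hMm : M ∈ sub) (hub : ∀ x ∈ sub, x ≤ M) :
    ∀ ds : List Char, M ∈ ds → ds.Pairwise (· > ·) →
      goB sub ai ds =
        ((PySem.Int.ofChars? [M]).getD 0,
         ai + 1 + (((PySem.List.index? sub M).getD 0 : Nat) : Int)) := by
  intro ds
  induction ds with
  | nil => intro h; simp at h
  | cons d ds ih =>
    intro hmem hpw
    by_cases hdM : d = M
    · subst hdM
      obtain ⟨j, hj⟩ := Option.isSome_iff_exists.mp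
        ((PySem.List.index?_isSome_iff sub d).mpr hMm)
      simp only [goB]
      rw [hj]
      rfl
    · have hMds : M ∈ ds := by
        rcases List.mem_cons.mp hmem with h | h
        · exact absurd h.symm hdM
        · exact h
      have hdgt : M < d := (List.pairwise_cons.mp hpw).1 M hMds
      have hnone : PySem.List.index? sub d = none :=
        notmem_index sub M d hub (not_le.mpr hdgt)
      simp only [goB, hnone]
      exact ih hMds (List.pairwise_cons.mp hpw).2

-- invariant of A's loop, started with a current best digit b held at result index i0
theorem loopA_spec (t : List Char) (k : Int) (b : Char) (i0 : Int)
    (hd : ∀ c ∈ t, PySem.Chars.isdigit c = true) (hb : PySem.Chars.isdigit b = true) :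
    (PySem.List.enumerate t k).foldl stepA (((b.toNat : Int) - 48), i0) =
      (if t.foldl max b ≤ b then (((b.toNat : Int) - 48), i0)
       else ((((t.foldl max b).toNat : Int) - 48),
             k + (((PySem.List.index? t (t.foldl max b)).getD 0 : Nat) : Int))) := by
  induction t generalizing k b i0 with
  | nil => simp [PySem.List.enumerate_nil]
  | cons c t ih =>
    have hc : PySem.Chars.isdigit c = true := hd c (by simp)
    have hdt : ∀ x ∈ t, PySem.Chars.isdigit x = true := fun x hx => hd x (by simp [hx])
    rw [PySem.List.enumerate_cons]
    simp only [List.foldl_cons]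
    have hstep : stepA (((b.toNat : Int) - 48), i0) (k, c)
        = if b < c then (((c.toNat : Int) - 48), k) else (((b.toNat : Int) - 48), i0) := by
      simp only [stepA, digit_val c hc, Option.getD_some]
      by_cases hbc : b < c
      · rw [if_pos (by have := (lt_iff_toNat b c).mp hbc; omega), if_pos hbc]
      · rw [if_neg (by intro hgt; exact hbc ((lt_iff_toNat b c).mpr (by omega))), if_neg hbc]
    by_cases hbc : b < c
    · rw [hstep, if_pos hbc, ih (k + 1) c k hdt hc]
      have hmax : max b c = c := max_eq_right hbc.le
      have hcM : c ≤ t.foldl max c := (PySem.List.le_foldl_max t c).1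
      have hMb : ¬ t.foldl max c ≤ b := fun h => absurd (le_trans hcM h) (not_le.mpr hbc)
      simp only [hmax, if_neg hMb]
      by_cases hMc : t.foldl max c ≤ c
      · have hM : t.foldl max c = c := le_antisymm hMc hcM
        rw [if_pos hMc, hM, PySem.List.index?_cons_self]
        simp
      · rw [if_neg hMc]
        have hMne : t.foldl max c ≠ c := fun h => hMc (le_of_eq h)
        have hMmem : t.foldl max c ∈ t := by
          rcases PySem.List.foldl_max_mem t c with h | h
          · exact absurd h hMne
          · exact h
        obtain ⟨j, hj⟩ := Option.isSome_iff_exists.mp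
          ((PySem.List.index?_isSome_iff t (t.foldl max c)).mpr hMmem)
        rw [PySem.List.index?_cons_of_ne t (fun h => hMne h.symm), hj]
        simp only [Option.map_some, Option.getD_some]
        simp only [Prod.mk.injEq, true_and]
        push_cast; ring
    · rw [hstep, if_neg hbc, ih (k + 1) b i0 hdt hb]
      have hcb : c ≤ b := not_lt.mp hbc
      have hmax : max b c = b := max_eq_left hcb
      simp only [hmax]
      by_cases hMb : t.foldl max b ≤ b
      · rw [if_pos hMb, if_pos hMb]
      · rw [if_neg hMb, if_neg hMb]
        have hbM : b < t.foldl max b := not_le.mp hMb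
        have hMne : t.foldl max b ≠ c := fun h => by rw [h] at hbM; exact (not_lt.mpr hcb) hbM
        have hMmem : t.foldl max b ∈ t := by
          rcases PySem.List.foldl_max_mem t b with h | h
          · rw [h] at hbM; exact absurd hbM (lt_irrefl b)
          · exact h
        obtain ⟨j, hj⟩ := Option.isSome_iff_exists.mp
          ((PySem.List.index?_isSome_iff t (t.foldl max b)).mpr hMmem)
        rw [PySem.List.index?_cons_of_ne t (fun h => hMne h.symm), hj]
        simp only [Option.map_some, Option.getD_some]
        simp only [Prod.mk.injEq, true_and]
        push_cast; ring

-- ===== VERDICT (by name: the statement is the Claim_ definition above) =====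
theorem get_highest_spec : Claim_equal_get_highest := by
  intro s mai ai _ hpre
  unfold Spec_get_highest get_highest get_highest_alt
  unfold Pre_get_highest at hpre
  rcases hcs : PySem.List.slice s.toList (some (ai + 1)) (some (mai + 1)) with _ | ⟨c, t⟩
  · simp [PySem.List.enumerate_nil, goB]
  · rw [hcs] at hpre
    have hall := List.all_eq_true.mp hpre
    have hc : PySem.Chars.isdigit c = true := hall c (by simp)
    have hdt : ∀ x ∈ t, PySem.Chars.isdigit x = true := fun x hx => hall x (by simp [hx])
    -- the maximum digit of the slice, M := t.foldl max c
    have hcM : c ≤ t.foldl max c := (PySem.List.le_foldl_max t c).1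
    have htM : ∀ y ∈ t, y ≤ t.foldl max c := (PySem.List.le_foldl_max t c).2
    have hMmem : t.foldl max c ∈ c :: t := by
      rcases PySem.List.foldl_max_mem t c with h | h
      · rw [h]; simp
      · exact List.mem_cons_of_mem c h
    have hub : ∀ x ∈ c :: t, x ≤ t.foldl max c := by
      intro x hx; rcases List.mem_cons.mp hx with h | h
      · rw [h]; exact hcM
      · exact htM x h
    have hMd : PySem.Chars.isdigit (t.foldl max c) = true := hall _ hMmem
    -- B side: the alphabet scan stops at M
    have hB := goB_spec (c :: t) ai (t.foldl max c) hMmem hub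
      ['9','8','7','6','5','4','3','2','1','0']
      (by have hm := digit_mem _ hMd
          simp only [List.mem_cons, List.not_mem_nil, or_false] at hm ⊢; tauto)
      (by decide)
    rw [hB, digit_val _ hMd]
    -- A side
    simp only [PySem.List.enumerate_cons, List.foldl_cons, zero_add]
    have hstep0 : stepA (-1, 0) (0, c) = (((c.toNat : Int) - 48), 0) := by
      simp only [stepA, digit_val c hc, Option.getD_some]
      rw [if_pos (by have := digit_ge c hc; omega)]
    rw [hstep0, loopA_spec t 1 c 0 hdt hc]
    by_cases hMc : t.foldl max c ≤ c
    · have hM : t.foldl max c = c := le_antisymm hMc hcM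
      rw [if_pos hMc, hM, PySem.List.index?_cons_self]
      simp
    · rw [if_neg hMc]
      have hMne : t.foldl max c ≠ c := fun h => hMc (le_of_eq h)
      have hMmemt : t.foldl max c ∈ t := by
        rcases List.mem_cons.mp hMmem with h | h
        · exact absurd h hMne
        · exact h
      obtain ⟨j, hj⟩ := Option.isSome_iff_exists.mp
        ((PySem.List.index?_isSome_iff t (t.foldl max c)).mpr hMmemt)
      rw [PySem.List.index?_cons_of_ne t (fun h => hMne h.symm), hj]
      simp only [Option.map_some, Option.getD_some, Option.getD_some, Prod.mk.injEq, true_and]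
      push_cast; ring
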